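-- pv_equiv track=rewrite | github.com/cutyrei/project-euler | p043_Sub-string divisibility.py | mk_num
-- ===== SOURCE A (Python) =====
-- def mk_num(div):
--     results = []
--     for i in range(10):
--         for j in range(10):
--             if j == i: continue
--             for k in range(10):
--                 if k == j or k == i: continue
--                 if int(str(i)+str(j)+str(k)) % div == 0:
--                     results.append(str(i)+str(j)+str(k))
--     return results
-- ===== SOURCE B (Python) =====
-- def mk_num(div):
--     results = []
--     for n in range(1000):
--         s = str(n).zfill(3)
--         if len(set(s)) == 3 and n % div == 0:
--             results.append(s)
--     return results
-- ===== Notes on version B (the rewrite author's own statement) =====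
-- stated objective: simpler
-- what changed: Replaced the three nested digit loops with continue-skips by a single flat scan of 0..999 that keeps n when its zero-padded string has three distinct characters (set cardinality) and n % div == 0.
-- outside the precondition, e.g. on mk_num(0): A raises ZeroDivisionError, B raises ZeroDivisionError
import Mathlib
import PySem

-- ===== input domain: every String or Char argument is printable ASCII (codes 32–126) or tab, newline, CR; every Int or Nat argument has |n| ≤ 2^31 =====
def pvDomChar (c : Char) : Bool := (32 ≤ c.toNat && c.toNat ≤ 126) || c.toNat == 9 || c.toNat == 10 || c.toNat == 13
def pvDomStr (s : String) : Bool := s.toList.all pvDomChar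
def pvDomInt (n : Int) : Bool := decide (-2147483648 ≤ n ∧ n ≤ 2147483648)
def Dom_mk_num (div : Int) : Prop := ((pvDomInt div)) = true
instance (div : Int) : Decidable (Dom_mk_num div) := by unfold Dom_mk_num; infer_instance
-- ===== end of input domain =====

-- B replaces A's three nested digit loops with one flat scan of 0..999, testing digit
-- distinctness via set cardinality of the zero-padded string (objective: simpler).


-- ===== PORT A =====
-- the 'none' branch of int(str(i)+str(j)+str(k)) is unreachable (the string is digits)
def mk_num (div : Int) : List String :=
  (PySem.List.pyRange 0 10 1).foldl (fun results i =>
    (PySem.List.pyRange 0 10 1).foldl (fun results j =>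
      if j == i then results else
      (PySem.List.pyRange 0 10 1).foldl (fun results k =>
        if k == j || k == i then results else
        match PySem.Int.ofStr? (PySem.Int.toStr i ++ PySem.Int.toStr j ++ PySem.Int.toStr k) with
        | some v =>
          if PySem.Int.mod v div == 0 then
            results ++ [PySem.Int.toStr i ++ PySem.Int.toStr j ++ PySem.Int.toStr k]
          else results
        | none => results
      ) results) results) []

-- ===== PORT B =====
def mk_num_alt (div : Int) : List String :=
  (PySem.List.pyRange 0 1000 1).foldl (fun results n =>
    let s := PySem.Str.zfill (PySem.Int.toStr n) 3
    if PySem.Set.len (PySem.Set.ofList s.toList) == 3 && PySem.Int.mod n div == 0 then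
      results ++ [s]
    else results) []

-- ===== PRECONDITION & SPEC =====
-- Python A (and Python B) raise ZeroDivisionError when div == 0; Pre_ excludes exactly that input.
def Pre_mk_num (div : Int) : Prop := div ≠ 0
instance (div : Int) : Decidable (Pre_mk_num div) := by unfold Pre_mk_num; infer_instance
def pvWitness_mk_num : Int := 7

def Spec_mk_num (div : Int) (out : List String) : Prop := out = mk_num_alt div
instance (div : Int) (out : List String) : Decidable (Spec_mk_num div out) := by unfold Spec_mk_num; infer_instance

-- ===== CLAIM (what is proved, stated in full; the proofs are below) =====
def Claim_equal_mk_num : Prop := ∀ (div : Int), Dom_mk_num div → Pre_mk_num div → Spec_mk_num div (mk_num div)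

-- ===== LEMMAS AND PROOFS =====

-- proof-only helpers: the candidate string of A, A's candidate (value, string) pairs,
-- B's padded string / distinctness test, and the distinct-digit numbers of 0..999
def pvStr3 (i j k : Int) : String :=
  PySem.Int.toStr i ++ PySem.Int.toStr j ++ PySem.Int.toStr k

def pvG (i j : Int) (k : Int) : Option (Int × String) :=
  if k == j || k == i then none
  else (PySem.Int.ofStr? (pvStr3 i j k)).map (fun v => (v, pvStr3 i j k))

def pvCandsA : List (Int × String) :=
  (PySem.List.pyRange 0 10 1).flatMap (fun i =>
    (PySem.List.pyRange 0 10 1).flatMap (fun j =>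
      if (j == i) = true then [] else (PySem.List.pyRange 0 10 1).filterMap (pvG i j)))

def pvPad (n : Int) : String := PySem.Str.zfill (PySem.Int.toStr n) 3

def pvDist (n : Int) : Bool := PySem.Set.len (PySem.Set.ofList (pvPad n).toList) == 3

def pvLB : List Int := (PySem.List.pyRange 0 1000 1).filter pvDist

-- a loop whose body is 'match g k with some b => f acc b | none => acc' folds over filterMap
lemma pv_foldl_filterMap {α β γ : Type} (g : α → Option β) (f : γ → β → γ) (body : γ → α → γ)
    (hbody : ∀ acc k, body acc k = match g k with | some b => f acc b | none => acc) :
    ∀ (l : List α) (acc : γ), l.foldl body acc = (l.filterMap g).foldl f acc := by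
  intro l
  induction l with
  | nil => intro acc; rfl
  | cons k ks ih =>
    intro acc
    rw [List.foldl_cons, List.filterMap_cons, hbody]
    cases g k <;> exact ih _

-- A's innermost k-loop is a fold of the divisibility step over the filterMap'd candidates
lemma pv_innerK (div i j : Int) (ks : List Int) (acc : List String) :
    ks.foldl (fun results k =>
      if k == j || k == i then results else
      match PySem.Int.ofStr? (PySem.Int.toStr i ++ PySem.Int.toStr j ++ PySem.Int.toStr k) with
      | some v =>
        if PySem.Int.mod v div == 0 then
          results ++ [PySem.Int.toStr i ++ PySem.Int.toStr j ++ PySem.Int.toStr k]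
        else results
      | none => results) acc
    = (ks.filterMap (pvG i j)).foldl
        (fun acc pr => if PySem.Int.mod pr.1 div == 0 then acc ++ [pr.2] else acc) acc := by
  refine pv_foldl_filterMap (pvG i j) _ _ ?_ ks acc
  intro acc k
  by_cases hk : (k == j || k == i) = true
  · simp [pvG, hk]
  · cases h : PySem.Int.ofStr? (PySem.Int.toStr i ++ PySem.Int.toStr j ++ PySem.Int.toStr k) <;>
      simp [pvG, pvStr3, hk, h]

-- fold of the divisibility step = filter + map
lemma pv_step_fold (div : Int) (l : List (Int × String)) (acc : List String) :
    l.foldl (fun acc pr => if PySem.Int.mod pr.1 div == 0 then acc ++ [pr.2] else acc) acc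
    = acc ++ (l.filter (fun pr => PySem.Int.mod pr.1 div == 0)).map Prod.snd := by
  induction l generalizing acc with
  | nil => simp
  | cons pr l ih =>
    rw [List.foldl_cons, List.filter_cons]
    by_cases h : (PySem.Int.mod pr.1 div == 0) = true
    · rw [if_pos h, if_pos h, ih]
      simp
    · rw [if_neg h, if_neg h, ih]

-- A = filter + map over the concrete candidate pair list
set_option maxHeartbeats 1000000 in
lemma pv_A_eq (div : Int) :
    mk_num div = (pvCandsA.filter (fun pr => PySem.Int.mod pr.1 div == 0)).map Prod.snd := by
  unfold mk_num pvCandsA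
  generalize PySem.List.pyRange 0 10 1 = R
  simp only [pv_innerK]
  simp only [pv_step_fold]
  have h1 : ∀ (c : Prop) [Decidable c] (res X : List String),
      (if c then res else res ++ X) = res ++ (if c then [] else X) := by
    intro c _ res X; split <;> simp
  simp only [h1]
  have h2 : ∀ (g : Int → Int → List String),
      R.foldl (fun results i => R.foldl (fun results j => results ++ g i j) results) []
        = R.flatMap (fun i => R.flatMap (g i)) := by
    intro g
    have h3 : (fun (results : List String) (i : Int) =>
        R.foldl (fun results j => results ++ g i j) results)
        = (fun (results : List String) (i : Int) => results ++ R.flatMap (g i)) := by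
      funext results i
      exact PySem.List.foldl_append_eq_flatMap ..
    rw [h3, PySem.List.foldl_append_eq_flatMap, List.nil_append]
  rw [h2]
  simp only [List.filter_flatMap, List.map_flatMap,
    apply_ite (List.filter (fun pr : Int × String => PySem.Int.mod pr.1 div == 0)),
    apply_ite (List.map (Prod.snd : Int × String → String)), List.filter_nil, List.map_nil]


-- B's flat loop = filter + map, with the two filters split
lemma pv_B_fold (div : Int) :
    ∀ (l : List Int) (acc : List String),
    l.foldl (fun results n =>
      if pvDist n && PySem.Int.mod n div == 0 then results ++ [pvPad n] else results) acc
    = acc ++ ((l.filter pvDist).filter (fun n => PySem.Int.mod n div == 0)).map pvPad := by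
  intro l
  induction l with
  | nil => intro acc; simp
  | cons n l ih =>
    intro acc
    rw [List.foldl_cons, List.filter_cons]
    cases hd : pvDist n with
    | false =>
      simp only [Bool.false_and, Bool.false_eq_true, if_false]
      exact ih acc
    | true =>
      simp only [Bool.true_and, if_true, List.filter_cons]
      cases hq : (PySem.Int.mod n div == 0) with
      | false =>
        simp only [Bool.false_eq_true, if_false]
        exact ih acc
      | true =>
        simp only [if_true]
        rw [ih]
        simp

lemma pv_B_eq (div : Int) :
    mk_num_alt div = (pvLB.filter (fun n => PySem.Int.mod n div == 0)).map pvPad := by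
  unfold mk_num_alt pvLB
  have hb : (fun (results : List String) (n : Int) =>
      let s := PySem.Str.zfill (PySem.Int.toStr n) 3
      if PySem.Set.len (PySem.Set.ofList s.toList) == 3 && PySem.Int.mod n div == 0 then
        results ++ [s]
      else results)
      = (fun (results : List String) (n : Int) =>
          if pvDist n && PySem.Int.mod n div == 0 then results ++ [pvPad n] else results) := by
    funext results n
    rfl
  rw [hb, pv_B_fold div, List.nil_append]

-- the concrete candidate lists of the two programs coincide (kernel computation)
set_option maxRecDepth 100000 in
set_option maxHeartbeats 8000000 in
lemma pv_cands_eq : pvCandsA = pvLB.map (fun n => (n, pvPad n)) := by decide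

-- ===== VERDICT (by name: the statement is the Claim_ definition above) =====
theorem mk_num_spec : Claim_equal_mk_num := by
  intro div _ _
  show mk_num div = mk_num_alt div
  rw [pv_A_eq, pv_B_eq, pv_cands_eq, List.filter_map, List.map_map]
  rfl
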